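-- pv_equiv track=rewrite | github.com/ASISaga/kb-mcp-server | src/txtai_mcp_server/tools/summarize.py | _analyze_markdown
-- ===== SOURCE A (Python) =====
-- def _analyze_markdown(content: str) -> str:
--     """Analyze markdown file structure."""
--     lines = content.split('\n')
--     headings = [l for l in lines if l.strip().startswith('#')]
--     links = content.count('[')
--     code_blocks = content.count('```')
--
--     parts = []
--     if headings:
--         parts.append(f"{len(headings)} headings")
--     if links > 0:
--         parts.append(f"{links} links")
--     if code_blocks > 0:
--         parts.append(f"{code_blocks // 2} code blocks")
--
--     return ', '.join(parts) if parts else "markdown document"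
-- ===== SOURCE B (Python) =====
-- def _analyze_markdown(content: str) -> str:
--     """Analyze markdown file structure (character-level state machine, one pass)."""
--     headings = links = fences = run = 0
--     at_line_start = True
--     for ch in content:
--         if ch == '[':
--             links += 1
--         if ch == '`':
--             run += 1
--         else:
--             fences += run // 3
--             run = 0
--         if ch == '\n':
--             at_line_start = True
--         elif at_line_start and not ch.isspace():
--             if ch == '#':
--                 headings += 1
--             at_line_start = False
--     fences += run // 3
--
--     parts = []
--     if headings:
--         parts.append(f"{headings} headings")
--     if links > 0:
--         parts.append(f"{links} links")
--     if fences > 0: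
--         parts.append(f"{fences // 2} code blocks")
--
--     return ', '.join(parts) if parts else "markdown document"
-- ===== Notes on version B (the rewrite author's own statement) =====
-- stated objective: alternative
-- what changed: B replaces A's line splitting, list comprehension and two whole-string substring scans by a character-level state machine: one pass over the characters tracking a line-start/leading-whitespace flag for headings, an opening-bracket counter for links, and the lengths of maximal backtick runs (each run of length k contributes k//3 fences).
import Mathlib
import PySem

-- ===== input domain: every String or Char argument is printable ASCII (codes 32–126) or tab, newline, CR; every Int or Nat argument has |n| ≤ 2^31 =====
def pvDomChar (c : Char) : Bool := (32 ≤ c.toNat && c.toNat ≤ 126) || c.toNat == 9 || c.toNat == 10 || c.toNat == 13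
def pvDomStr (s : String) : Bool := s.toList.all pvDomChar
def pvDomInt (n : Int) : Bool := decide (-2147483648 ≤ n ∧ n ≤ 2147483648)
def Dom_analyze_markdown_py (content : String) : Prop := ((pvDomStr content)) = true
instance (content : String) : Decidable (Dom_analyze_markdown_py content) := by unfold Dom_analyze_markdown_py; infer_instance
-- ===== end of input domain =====

-- B replaces A's line splitting + comprehension + two whole-string substring scans by a
-- character-level state machine: one pass over the characters with a line-start flag for
-- headings, a '[' counter, and backtick run lengths (each maximal run of k gives k//3 fences).

-- ===== PORT A =====
def analyze_markdown_py (content : String) : String :=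
  let lines := PySem.Chars.splitOn content.toList ['\n']                 -- content.split('\n')
  let headings := lines.filter (fun l => PySem.Chars.startswith (PySem.Chars.strip l) ['#'])
  let links : Int := (PySem.Chars.count content.toList ['['] : Int)      -- content.count('[')
  let code_blocks : Int := (PySem.Chars.count content.toList ['`', '`', '`'] : Int)
  let parts : List String := []
  let parts := if headings ≠ [] then parts ++ [PySem.Int.toStr (headings.length : Int) ++ " headings"] else parts
  let parts := if links > 0 then parts ++ [PySem.Int.toStr links ++ " links"] else parts
  let parts := if code_blocks > 0 then parts ++ [PySem.Int.toStr (PySem.Int.floordiv code_blocks 2) ++ " code blocks"] else parts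
  if parts ≠ [] then PySem.Str.join ", " parts else "markdown document"

-- ===== PORT B =====
-- state: (links, (fences, run), (headings, at_line_start)); one fold over the characters
def analyze_markdown_py_alt (content : String) : String :=
  let st := content.toList.foldl
      (fun (s : Int × (Int × Int) × (Int × Bool)) ch =>
        ((if ch == '[' then s.1 + 1 else s.1),
         (if ch == '`' then (s.2.1.1, s.2.1.2 + 1)
          else (s.2.1.1 + PySem.Int.floordiv s.2.1.2 3, 0)),
         (if ch == '\n' then (s.2.2.1, true)
          else if s.2.2.2 && !(PySem.Chars.isspace ch) then
            ((if ch == '#' then s.2.2.1 + 1 else s.2.2.1), false)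
          else s.2.2)))
      (0, (0, 0), (0, true))
  let links := st.1
  let fences := st.2.1.1 + PySem.Int.floordiv st.2.1.2 3                 -- final fences += run // 3
  let headings := st.2.2.1
  let parts : List String := []
  let parts := if headings ≠ 0 then parts ++ [PySem.Int.toStr headings ++ " headings"] else parts
  let parts := if links > 0 then parts ++ [PySem.Int.toStr links ++ " links"] else parts
  let parts := if fences > 0 then parts ++ [PySem.Int.toStr (PySem.Int.floordiv fences 2) ++ " code blocks"] else parts
  if parts ≠ [] then PySem.Str.join ", " parts else "markdown document"

-- ===== PRECONDITION & SPEC =====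
def Spec_analyze_markdown_py (content : String) (out : String) : Prop := out = analyze_markdown_py_alt content
instance (content : String) (out : String) : Decidable (Spec_analyze_markdown_py content out) := by unfold Spec_analyze_markdown_py; infer_instance

-- ===== CLAIM (what is proved, stated in full; the proofs are below) =====
def Claim_equal_analyze_markdown_py : Prop := ∀ (content : String), Dom_analyze_markdown_py content → Spec_analyze_markdown_py content (analyze_markdown_py content)

-- ===== LEMMAS AND PROOFS =====

/-- Fuel-free specification of Python's greedy non-overlapping substring count. -/
def pvCnt (pat : List Char) : List Char → Nat
  | [] => 0
  | h :: t =>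
      if pat.isPrefixOf (h :: t) then 1 + pvCnt pat (t.drop (pat.length - 1))
      else pvCnt pat t
termination_by l => l.length
decreasing_by
  · simp only [List.length_drop, List.length_cons]; omega
  · simp

theorem pvCnt_go (pat : List Char) (hne : pat ≠ []) :
    ∀ (fuel : Nat) (l : List Char) (acc : Nat), l.length ≤ fuel →
      PySem.Chars.count.go pat fuel l acc = acc + pvCnt pat l := by
  intro fuel
  induction fuel with
  | zero =>
      intro l acc h
      have : l = [] := by cases l <;> simp at h ⊢
      subst this
      rw [PySem.Chars.count.go.eq_def]
      simp [pvCnt]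
  | succ fuel ih =>
      intro l acc h
      cases l with
      | nil => rw [PySem.Chars.count.go.eq_def]; simp [pvCnt]
      | cons c rest =>
          rw [PySem.Chars.count.go.eq_def]
          simp only []
          by_cases hp : pat.isPrefixOf (c :: rest) = true
          · simp only [hp, if_true]
            have hlen : 1 ≤ pat.length := by cases pat <;> simp_all
            have hdrop : (c :: rest).drop pat.length = rest.drop (pat.length - 1) := by
              cases pat with
              | nil => simp_all
              | cons p ps => simp
            rw [hdrop, ih _ (acc + 1) (by simp at h; simp [List.length_drop]; omega)]
            simp [pvCnt, hp]; omega
          · simp only [hp]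
            rw [ih rest acc (by simp at h; omega)]
            simp [pvCnt, hp]

theorem pvCnt_count (pat : List Char) (hne : pat ≠ []) (l : List Char) :
    PySem.Chars.count l pat = pvCnt pat l := by
  unfold PySem.Chars.count
  have : pat.isEmpty = false := by cases pat <;> simp_all
  rw [this]
  simpa using pvCnt_go pat hne l.length l 0 (le_refl _)

/-- Counting a single-character pattern is counting that character. -/
theorem pvCnt_single (c : Char) (l : List Char) :
    pvCnt [c] l = l.countP (· == c) := by
  induction l with
  | nil => simp [pvCnt]
  | cons h t ih =>
      by_cases hc : h = c
      · subst hc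
        simp [pvCnt, List.isPrefixOf, ih, Nat.add_comm]
      · simp [pvCnt, List.isPrefixOf, Ne.symm hc, hc, ih]

/-- Greedy count of '```' in a pure backtick run. -/
theorem pvCnt_bt_repl : ∀ (n : Nat),
    pvCnt ['`', '`', '`'] (List.replicate n '`') = n / 3 := by
  intro n
  induction n using Nat.strong_induction_on with
  | _ n ih =>
      match n with
      | 0 => simp [pvCnt]
      | 1 => simp [pvCnt, List.replicate, List.isPrefixOf]
      | 2 => simp [pvCnt, List.replicate, List.isPrefixOf]
      | (m + 3) =>
          have hr : List.replicate (m + 3) '`' = '`' :: '`' :: '`' :: List.replicate m '`' := by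
            simp [List.replicate_succ]
          rw [hr]
          rw [pvCnt]
          simp only [List.isPrefixOf, BEq.rfl, if_true, Bool.and_self, List.length_cons,
            List.length_nil]
          norm_num
          rw [ih m (by omega)]
          omega

/-- Greedy count of '```' splits at a non-backtick character after a run. -/
theorem pvCnt_bt_break (c : Char) (hc : c ≠ '`') : ∀ (n : Nat) (t : List Char),
    pvCnt ['`', '`', '`'] (List.replicate n '`' ++ c :: t) = n / 3 + pvCnt ['`', '`', '`'] t := by
  have hpc : ∀ (t : List Char), (['`', '`', '`'] : List Char).isPrefixOf (c :: t) = false := by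
    intro t; simp [List.isPrefixOf, Ne.symm hc]
  have hp1 : ∀ (t : List Char), (['`', '`', '`'] : List Char).isPrefixOf ('`' :: c :: t) = false := by
    intro t; simp [List.isPrefixOf, Ne.symm hc]
  have hp2 : ∀ (t : List Char), (['`', '`', '`'] : List Char).isPrefixOf ('`' :: '`' :: c :: t) = false := by
    intro t; simp [List.isPrefixOf, Ne.symm hc]
  intro n
  induction n using Nat.strong_induction_on with
  | _ n ih =>
      intro t
      match n with
      | 0 =>
          simp only [List.replicate, List.nil_append]
          rw [pvCnt]
          simp [hpc]
      | 1 =>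
          rw [show List.replicate 1 '`' ++ c :: t = '`' :: c :: t by simp [List.replicate]]
          rw [pvCnt]
          simp only [hp1, Bool.false_eq_true, if_false]
          rw [pvCnt]
          simp [hpc]
      | 2 =>
          rw [show List.replicate 2 '`' ++ c :: t = '`' :: '`' :: c :: t by simp [List.replicate_succ]]
          rw [pvCnt]
          simp only [hp2, Bool.false_eq_true, if_false]
          rw [pvCnt]
          simp only [hp1, Bool.false_eq_true, if_false]
          rw [pvCnt]
          simp [hpc]
      | (m + 3) =>
          have hr : List.replicate (m + 3) '`' ++ c :: t
              = '`' :: '`' :: '`' :: (List.replicate m '`' ++ c :: t) := by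
            simp [List.replicate_succ]
          rw [hr, pvCnt]
          simp only [List.isPrefixOf, BEq.rfl, Bool.and_self, if_true, List.length_cons,
            List.length_nil]
          norm_num
          rw [ih m (by omega) t]
          omega

/-- Invariant of B's (fences, run) component: pending run r of backticks, then the rest. -/
theorem pv_fences_inv : ∀ (l : List Char) (f : Int) (n : Nat),
    (l.foldl (fun (u : Int × Int) ch =>
        if ch == '`' then (u.1, u.2 + 1) else (u.1 + PySem.Int.floordiv u.2 3, 0))
      (f, (n : Int))).1
    + PySem.Int.floordiv (l.foldl (fun (u : Int × Int) ch =>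
        if ch == '`' then (u.1, u.2 + 1) else (u.1 + PySem.Int.floordiv u.2 3, 0))
      (f, (n : Int))).2 3
    = f + (pvCnt ['`', '`', '`'] (List.replicate n '`' ++ l) : Int) := by
  intro l
  induction l with
  | nil =>
      intro f n
      simp only [List.foldl_nil, List.append_nil]
      rw [pvCnt_bt_repl n]
      have : PySem.Int.floordiv (n : Int) 3 = ((n / 3 : Nat) : Int) := by
        exact_mod_cast PySem.Int.floordiv_natCast n 3
      rw [this]
  | cons c t ih =>
      intro f n
      by_cases hc : c = '`'
      · subst hc
        simp only [List.foldl_cons, BEq.rfl, if_true]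
        have hcast : ((n : Int) + 1) = ((n + 1 : Nat) : Int) := by push_cast; ring
        rw [hcast, ih f (n + 1)]
        have : List.replicate n '`' ++ '`' :: t = List.replicate (n + 1) '`' ++ t := by
          rw [List.replicate_succ' (n := n)]
          simp
        rw [this]
      · have hb : (c == '`') = false := by simp [hc]
        simp only [List.foldl_cons, hb, Bool.false_eq_true, if_false]
        have hfd : PySem.Int.floordiv (n : Int) 3 = ((n / 3 : Nat) : Int) := by
          exact_mod_cast PySem.Int.floordiv_natCast n 3
        rw [hfd]
        have h0 := ih (f + ((n / 3 : Nat) : Int)) 0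
        simp only [Nat.cast_zero, List.replicate, List.nil_append] at h0
        rw [h0, pvCnt_bt_break c hc n t]
        push_cast
        ring

/-- Heading-line counter: `b` = still at the (whitespace) start of the current line. -/
def pvH (b : Bool) : List Char → Nat
  | [] => 0
  | c :: t =>
      if c == '\n' then pvH true t
      else if b && !(PySem.Chars.isspace c) then (if c == '#' then 1 else 0) + pvH false t
      else pvH b t

/-- B's (headings, at_line_start) fold computes pvH. -/
theorem pv_headings_fold : ∀ (l : List Char) (k : Int) (b : Bool),
    (l.foldl (fun (u : Int × Bool) ch =>
        if ch == '\n' then (u.1, true)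
        else if u.2 && !(PySem.Chars.isspace ch) then ((if ch == '#' then u.1 + 1 else u.1), false)
        else u)
      (k, b)).1 = k + (pvH b l : Int) := by
  intro l
  induction l with
  | nil => intro k b; simp [pvH]
  | cons c t ih =>
      intro k b
      by_cases h1 : c = '\n'
      · subst h1
        simp only [List.foldl_cons, BEq.rfl, if_true]
        rw [ih]
        simp [pvH]
      · have hb1 : (c == '\n') = false := by simp [h1]
        by_cases h2 : (b && !(PySem.Chars.isspace c)) = true
        · by_cases h3 : c = '#'
          · subst h3
            simp only [List.foldl_cons, hb1, Bool.false_eq_true, if_false, h2, if_true, BEq.rfl]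
            rw [ih]
            simp [pvH, hb1, h2]
            ring
          · have hb3 : (c == '#') = false := by simp [h3]
            simp only [List.foldl_cons, hb1, Bool.false_eq_true, if_false, h2, if_true, hb3]
            rw [ih]
            simp [pvH, hb1, h2, hb3]
        · have h2' : (b && !(PySem.Chars.isspace c)) = false := by
            revert h2; cases b <;> cases PySem.Chars.isspace c <;> simp
          simp only [List.foldl_cons, hb1, Bool.false_eq_true, if_false, h2', if_false]
          rw [ih]
          simp [pvH, hb1, h2']

/-- Clean recursive version of content.split('\n'). -/
def pvConsHead (c : Char) : List (List Char) → List (List Char)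
  | [] => [[c]]
  | h :: ts => (c :: h) :: ts

def pvSplit : List Char → List (List Char)
  | [] => [[]]
  | c :: t => if c == '\n' then [] :: pvSplit t else pvConsHead c (pvSplit t)

theorem pvSplit_ne_nil (l : List Char) : pvSplit l ≠ [] := by
  cases l with
  | nil => simp [pvSplit]
  | cons c t =>
      simp only [pvSplit]
      split
      · simp
      · cases h : pvSplit t <;> simp [pvConsHead]

def pvGlue (pre : List Char) : List (List Char) → List (List Char)
  | [] => [pre]
  | h :: ts => (pre ++ h) :: ts

theorem pvGlue_nil (xs : List (List Char)) (h : xs ≠ []) : pvGlue [] xs = xs := by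
  cases xs with
  | nil => exact absurd rfl h
  | cons a b => simp [pvGlue]

theorem pvGlue_snoc (pre : List Char) (c : Char) (xs : List (List Char)) (h : xs ≠ []) :
    pvGlue (pre ++ [c]) xs = pvGlue pre (pvConsHead c xs) := by
  cases xs with
  | nil => exact absurd rfl h
  | cons a b => simp [pvGlue, pvConsHead]

theorem pvSplit_go (fuel : Nat) : ∀ (l cur : List Char) (acc : List (List Char)),
    l.length ≤ fuel →
    PySem.Chars.splitOn.go ['\n'] fuel l cur acc = acc.reverse ++ pvGlue cur.reverse (pvSplit l) := by
  induction fuel with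
  | zero =>
      intro l cur acc h
      have : l = [] := by cases l <;> simp at h ⊢
      subst this
      rw [PySem.Chars.splitOn.go.eq_def]
      simp [pvSplit, pvGlue]
  | succ fuel ih =>
      intro l cur acc h
      cases l with
      | nil =>
          rw [PySem.Chars.splitOn.go.eq_def]
          simp [pvSplit, pvGlue]
      | cons c rest =>
          rw [PySem.Chars.splitOn.go.eq_def]
          simp only []
          by_cases hc : c = '\n'
          · subst hc
            have hp : (['\n'] : List Char).isPrefixOf ('\n' :: rest) = true := by
              simp [List.isPrefixOf]
            rw [if_pos hp]
            simp only [List.length_singleton, List.drop_one, List.tail_cons]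
            rw [ih rest [] _ (by simp at h; omega)]
            simp only [List.reverse_nil]
            rw [pvGlue_nil _ (pvSplit_ne_nil rest)]
            simp [pvSplit, pvGlue]
          · have hp : (['\n'] : List Char).isPrefixOf (c :: rest) = false := by
              simp [List.isPrefixOf, Ne.symm hc]
            rw [if_neg (by simp [hp])]
            rw [ih rest (c :: cur) acc (by simp at h; omega)]
            have : (c :: cur).reverse = cur.reverse ++ [c] := by simp
            rw [this, pvGlue_snoc _ _ _ (pvSplit_ne_nil rest)]
            have hs : pvSplit (c :: rest) = pvConsHead c (pvSplit rest) := by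
              simp [pvSplit, hc]
            rw [hs]

theorem pvSplit_eq (l : List Char) : PySem.Chars.splitOn l ['\n'] = pvSplit l := by
  unfold PySem.Chars.splitOn
  rw [pvSplit_go (l.length + 1) l [] [] (by omega)]
  simp [pvGlue_nil _ (pvSplit_ne_nil l)]

/-- The heading test on a line. -/
def pvLine (line : List Char) : Bool :=
  PySem.Chars.startswith (PySem.Chars.strip line) ['#']

theorem pvLine_nil : pvLine [] = false := by decide

theorem pvLine_cons_space (c : Char) (h : PySem.Chars.isspace c = true) (line : List Char) :
    pvLine (c :: line) = pvLine line := by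
  simp [pvLine, PySem.Chars.strip, PySem.Chars.lstrip, List.dropWhile, h]

theorem pvLine_cons_nonspace (c : Char) (h : PySem.Chars.isspace c = false) (line : List Char) :
    pvLine (c :: line) = (c == '#') := by
  have hl : PySem.Chars.lstrip (c :: line) = c :: line := by
    simp [PySem.Chars.lstrip, List.dropWhile, h]
  have hdw : List.dropWhile PySem.Chars.isspace (line.reverse ++ [c])
      = List.dropWhile PySem.Chars.isspace line.reverse ++ [c] := by
    rw [List.dropWhile_append]
    split
    · next he =>
        simp only [List.isEmpty_iff] at he
        simp [he, List.dropWhile, h]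
    · rfl
  have hr : PySem.Chars.rstrip (c :: line)
      = c :: (List.dropWhile PySem.Chars.isspace line.reverse).reverse := by
    simp [PySem.Chars.rstrip, hdw]
  simp only [pvLine, PySem.Chars.strip, hl, hr]
  by_cases hc : c = '#'
  · subst hc; simp [PySem.Chars.startswith, List.isPrefixOf]
  · simp [PySem.Chars.startswith, List.isPrefixOf, Ne.symm hc, hc]

/-- pvH counts the heading lines of pvSplit. -/
theorem pvH_spec : ∀ (l : List Char),
    pvH true l = (pvSplit l).countP pvLine ∧ pvH false l = ((pvSplit l).tail).countP pvLine := by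
  intro l
  induction l with
  | nil => simp [pvH, pvSplit, pvLine_nil]
  | cons c t ih =>
      by_cases h1 : c = '\n'
      · subst h1
        simp only [pvH, pvSplit, BEq.rfl, if_true]
        constructor
        · rw [List.countP_cons, ih.1]
          simp [pvLine_nil]
        · simpa using ih.1
      · have hb1 : (c == '\n') = false := by simp [h1]
        obtain ⟨hd, ts, hsp⟩ : ∃ hd ts, pvSplit t = hd :: ts := by
          cases hps : pvSplit t with
          | nil => exact absurd hps (pvSplit_ne_nil t)
          | cons a b => exact ⟨a, b, rfl⟩
        have hs : pvSplit (c :: t) = (c :: hd) :: ts := by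
          simp [pvSplit, hb1, hsp, pvConsHead]
        by_cases h2 : PySem.Chars.isspace c = true
        · have hch : pvLine (c :: hd) = pvLine hd := pvLine_cons_space c h2 hd
          constructor
          · simp only [pvH, hb1, Bool.false_eq_true, if_false, h2, Bool.not_true, Bool.and_false]
            rw [hs, List.countP_cons, hch]
            rw [ih.1, hsp, List.countP_cons]
          · simp only [pvH, hb1, Bool.false_eq_true, if_false, Bool.false_and]
            rw [hs]
            simpa [hsp] using ih.2
        · have h2' : PySem.Chars.isspace c = false := by revert h2; cases PySem.Chars.isspace c <;> simp
          have hch : pvLine (c :: hd) = (c == '#') := pvLine_cons_nonspace c h2' hd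
          constructor
          · simp only [pvH, hb1, Bool.false_eq_true, if_false, h2', Bool.not_false, Bool.and_true,
              if_true]
            rw [hs, List.countP_cons, hch]
            rw [ih.2, hsp]
            simp only [List.tail_cons]
            by_cases hc : c = '#' <;> simp [hc, Nat.add_comm]
          · simp only [pvH, hb1, Bool.false_eq_true, if_false, Bool.false_and]
            rw [hs]
            simpa [hsp] using ih.2

/-- B's big fold, split into its three independent components. -/
theorem pv_fold_split (l : List Char) :
    l.foldl
      (fun (s : Int × (Int × Int) × (Int × Bool)) ch =>
        ((if ch == '[' then s.1 + 1 else s.1),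
         (if ch == '`' then (s.2.1.1, s.2.1.2 + 1)
          else (s.2.1.1 + PySem.Int.floordiv s.2.1.2 3, 0)),
         (if ch == '\n' then (s.2.2.1, true)
          else if s.2.2.2 && !(PySem.Chars.isspace ch) then
            ((if ch == '#' then s.2.2.1 + 1 else s.2.2.1), false)
          else s.2.2)))
      (0, (0, 0), (0, true))
    = (l.foldl (fun (a : Int) ch => if ch == '[' then a + 1 else a) 0,
       l.foldl (fun (u : Int × Int) ch =>
          if ch == '`' then (u.1, u.2 + 1) else (u.1 + PySem.Int.floordiv u.2 3, 0)) (0, 0),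
       l.foldl (fun (u : Int × Bool) ch =>
          if ch == '\n' then (u.1, true)
          else if u.2 && !(PySem.Chars.isspace ch) then ((if ch == '#' then u.1 + 1 else u.1), false)
          else u) (0, true)) := by
  rw [PySem.List.foldl_prod_mk
        (fun (a : Int) ch => if ch == '[' then a + 1 else a)
        (fun (u : (Int × Int) × (Int × Bool)) ch =>
          ((if ch == '`' then (u.1.1, u.1.2 + 1) else (u.1.1 + PySem.Int.floordiv u.1.2 3, 0)),
           (if ch == '\n' then (u.2.1, true)
            else if u.2.2 && !(PySem.Chars.isspace ch) then ((if ch == '#' then u.2.1 + 1 else u.2.1), false)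
            else u.2)))]
  rw [PySem.List.foldl_prod_mk
        (fun (u : Int × Int) ch =>
          if ch == '`' then (u.1, u.2 + 1) else (u.1 + PySem.Int.floordiv u.2 3, 0))
        (fun (u : Int × Bool) ch =>
          if ch == '\n' then (u.1, true)
          else if u.2 && !(PySem.Chars.isspace ch) then ((if ch == '#' then u.1 + 1 else u.1), false)
          else u)]

-- ===== VERDICT (by name: the statement is the Claim_ definition above) =====
theorem analyze_markdown_py_spec : Claim_equal_analyze_markdown_py := by
  intro content _
  unfold Spec_analyze_markdown_py analyze_markdown_py analyze_markdown_py_alt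
  rw [pv_fold_split content.toList]
  -- links
  have hlinks : content.toList.foldl (fun (a : Int) ch => if ch == '[' then a + 1 else a) 0
      = (PySem.Chars.count content.toList ['['] : Int) := by
    rw [PySem.List.foldl_if_add_one, pvCnt_count ['['] (by simp) content.toList,
      pvCnt_single '[' content.toList]
    simp
  -- fences
  have hfences := pv_fences_inv content.toList 0 0
  simp only [Nat.cast_zero, List.replicate, List.nil_append] at hfences
  rw [← pvCnt_count ['`', '`', '`'] (by simp) content.toList] at hfences
  rw [zero_add] at hfences
  -- headings
  have hhead : (content.toList.foldl (fun (u : Int × Bool) ch =>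
      if ch == '\n' then (u.1, true)
      else if u.2 && !(PySem.Chars.isspace ch) then ((if ch == '#' then u.1 + 1 else u.1), false)
      else u) (0, true)).1
      = (((PySem.Chars.splitOn content.toList ['\n']).filter
            (fun l => PySem.Chars.startswith (PySem.Chars.strip l) ['#'])).length : Int) := by
    rw [pv_headings_fold content.toList 0 true, (pvH_spec content.toList).1, ← pvSplit_eq]
    simp only [List.countP_eq_length_filter, zero_add, Nat.cast_inj]
    rfl
  have hcond : ((((PySem.Chars.splitOn content.toList ['\n']).filter
        (fun l => PySem.Chars.startswith (PySem.Chars.strip l) ['#'])).length : Int) ≠ 0)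
      ↔ ((PySem.Chars.splitOn content.toList ['\n']).filter
        (fun l => PySem.Chars.startswith (PySem.Chars.strip l) ['#'])) ≠ [] := by
    simp [List.length_eq_zero_iff]
  simp only [hlinks, hfences, hhead, hcond]
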